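-- pv_equiv track=rewrite | github.com/anguswilliams91/advent-of-code-2020 | 21/main.py | process_recipes
-- ===== SOURCE A (Python) =====
-- from collections import defaultdict
-- from functools import reduce
-- from typing import DefaultDict, List, Set
--
-- def process_recipes(
--     foods: List[str]
-- ) -> (Set[str], DefaultDict[str, int], DefaultDict[str, Set[str]]):
--
--     all_ingredients = set()
--     for food in foods:
--         ingredients, _ = food.split("(")
--         all_ingredients = all_ingredients | set(ingredients.strip().split())
--
--     could_contain_allergen = defaultdict(lambda: all_ingredients)
--     ingredient_counts = defaultdict(int)
--     for food in foods:
--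
--         ingredients, allergens = food.split("(")
--         ingredients = set(ingredients.strip().split())
--         for i in ingredients:
--             ingredient_counts[i] += 1
--
--         allergens = set(allergens.strip(")")[8:].strip().split(", "))
--
--         for a in allergens:
--             could_contain_allergen[a] = ingredients & could_contain_allergen[a]
--
--     unseen_ingredients = all_ingredients - reduce(
--         lambda a, b: a | b, could_contain_allergen.values()
--     )
--
--     return unseen_ingredients, ingredient_counts, could_contain_allergen
-- ===== SOURCE B (Python) =====
-- from collections import defaultdict
--
--
-- def process_recipes(foods):
--     # Parse each food once into (ingredient_list, allergen_list).
--     recs = []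
--     for food in foods:
--         ings, alls = food.split("(")
--         recs.append((ings.strip().split(),
--                      alls.strip(")")[8:].strip().split(", ")))
--
--     all_ingredients = {i for ings, _ in recs for i in ings}
--
--     # Allergen-major: each allergen's candidate set is computed independently
--     # by a membership test over the foods that mention it.
--     allergen_order = list(dict.fromkeys(a for _, als in recs for a in als))
--     could_contain_allergen = defaultdict(lambda: all_ingredients)
--     for a in allergen_order:
--         group = [ings for ings, als in recs if a in als]
--         base = dict.fromkeys(group[-1])
--         could_contain_allergen[a] = {i for i in base
--                                      if all(i in g for g in group)}
--
--     # Ingredient-major counting: a count is the number of recipes listing it.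
--     ingredient_order = list(dict.fromkeys(i for ings, _ in recs for i in ings))
--     ingredient_counts = defaultdict(int)
--     for i in ingredient_order:
--         ingredient_counts[i] = sum(1 for ings, _ in recs if i in ings)
--
--     unseen_ingredients = {
--         i for i in ingredient_order
--         if not any(i in could_contain_allergen[a] for a in allergen_order)
--     }
--     return unseen_ingredients, ingredient_counts, could_contain_allergen
-- ===== Notes on version B (the rewrite author's own statement) =====
-- stated objective: alternative
-- what changed: B is allergen-major and ingredient-major: after one parsing pass it computes each allergen's candidate set independently by a membership test over the foods that mention it, each ingredient's count by scanning the parsed recipes, and the unseen set by testing membership in every candidate set, instead of A's food-major pass that incrementally intersects dict entries and increments counters and then reduces a union.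
import Mathlib
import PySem

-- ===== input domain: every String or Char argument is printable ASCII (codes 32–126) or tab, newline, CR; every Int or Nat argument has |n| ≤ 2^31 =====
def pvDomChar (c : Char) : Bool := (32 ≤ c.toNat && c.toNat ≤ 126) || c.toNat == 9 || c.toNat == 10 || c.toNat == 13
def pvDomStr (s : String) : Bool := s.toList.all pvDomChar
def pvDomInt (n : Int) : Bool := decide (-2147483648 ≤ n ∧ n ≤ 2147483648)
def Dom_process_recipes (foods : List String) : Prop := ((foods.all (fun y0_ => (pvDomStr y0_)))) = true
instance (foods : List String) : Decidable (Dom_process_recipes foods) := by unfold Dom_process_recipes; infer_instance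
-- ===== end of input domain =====

-- B computes the same value allergen-major/ingredient-major (each candidate set and count derived
-- independently by membership tests over the parsed recipes) instead of A's food-major streaming
-- pass of dict intersections and counter increments (objective: alternative).

-- ===== PORT A =====
-- shared parse helpers (both Pythons contain these identical subexpressions)
def pvSplitParen (food : String) : String × String :=
  match (PySem.Str.split? food "(").getD [] with
  | [a, b] => (a, b)
  | _ => ("", "")   -- Python raises ValueError here (≠ 2 parts); excluded by Pre_

def pvRawIngs (s : String) : List String := PySem.Str.split₀ (PySem.Str.strip s)

def pvRawAllgs (s : String) : List String :=
  (PySem.Str.split?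
    (PySem.Str.strip (PySem.Str.slice (PySem.Str.stripChars s ")") (some 8) none)) ", ").getD []

def pvIngs (s : String) : PySem.Set String := PySem.Set.ofList (pvRawIngs s)

def pvAllgs (s : String) : PySem.Set String := PySem.Set.ofList (pvRawAllgs s)

def pvA_all (foods : List String) : PySem.Set String :=
  foods.foldl (fun acc food => PySem.Set.union acc (pvIngs (pvSplitParen food).1))
    PySem.Set.empty

def pvA_st (foods : List String) :
    PySem.Dict String (List String) × PySem.Dict String Int :=
  foods.foldl
    (fun (st : PySem.Dict String (List String) × PySem.Dict String Int) food =>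
      let p := pvSplitParen food
      let ingredients := pvIngs p.1
      let counts := ingredients.foldl (fun d i => d.modify i 0 (· + 1)) st.2
      let allergens := pvAllgs p.2
      let ccd := allergens.foldl
        (fun d a => d.insert a (PySem.Set.inter ingredients (d.getD a (pvA_all foods)))) st.1
      (ccd, counts))
    (PySem.Dict.empty, PySem.Dict.empty)

def pvA_big (foods : List String) : List String :=
  match (pvA_st foods).1.values with
  | [] => []          -- Python: TypeError (reduce over no values); excluded by Pre_
  | v :: vs => vs.foldl (fun a b => PySem.Set.union a b) v

def pvA_unseen (foods : List String) : List String :=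
  PySem.Set.diff (pvA_all foods) (pvA_big foods)

def process_recipes (foods : List String) :
    List String × (List (String × Int)) × (List (String × List String)) :=
  (pvA_unseen foods, (pvA_st foods).2.items, (pvA_st foods).1.items)

-- ===== PORT B =====
def pvB_recs (foods : List String) : List (List String × List String) :=
  foods.map (fun food =>
    let p := pvSplitParen food
    (pvRawIngs p.1, pvRawAllgs p.2))

def pvB_all (foods : List String) : PySem.Set String :=
  PySem.Set.ofList ((pvB_recs foods).flatMap (fun r => r.1))

def pvB_order (foods : List String) : List String :=
  PySem.List.dedup ((pvB_recs foods).flatMap (fun r => r.2))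

def pvB_group (foods : List String) (a : String) : List (List String) :=
  ((pvB_recs foods).filter (fun r => r.2.contains a)).map (fun r => r.1)

def pvB_base (foods : List String) (a : String) : List String :=
  -- group[-1]: never empty when a is in allergen order (a was read off some recipe of the group)
  PySem.List.dedup ((PySem.List.pyGet? (pvB_group foods a) (-1)).getD [])

def pvB_cand (foods : List String) (a : String) : List String :=
  (pvB_base foods a).filter (fun i => (pvB_group foods a).all (fun g => g.contains i))

def pvB_ccd (foods : List String) : PySem.Dict String (List String) :=
  (pvB_order foods).foldl (fun d a => d.insert a (pvB_cand foods a)) PySem.Dict.empty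

def pvB_iord (foods : List String) : List String :=
  PySem.List.dedup ((pvB_recs foods).flatMap (fun r => r.1))

def pvB_cnt (foods : List String) (i : String) : Int :=
  (pvB_recs foods).foldl (fun n r => if r.1.contains i then n + 1 else n) (0 : Int)

def pvB_counts (foods : List String) : PySem.Dict String Int :=
  (pvB_iord foods).foldl (fun d i => d.insert i (pvB_cnt foods i)) PySem.Dict.empty

def pvB_unseen (foods : List String) : List String :=
  (pvB_iord foods).filter (fun i =>
    !((pvB_order foods).any (fun a => ((pvB_ccd foods).getD a (pvB_all foods)).contains i)))

def process_recipes_alt (foods : List String) :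
    List String × (List (String × Int)) × (List (String × List String)) :=
  (pvB_unseen foods, (pvB_counts foods).items, (pvB_ccd foods).items)

-- ===== PRECONDITION & SPEC =====
-- Pre_ excludes exactly the inputs where A raises: an empty food list (reduce over an empty
-- sequence, TypeError) and any food without exactly one '(' (unpacking food.split("("), ValueError).
def Pre_process_recipes (foods : List String) : Prop :=
  foods ≠ [] ∧ ∀ food ∈ foods, PySem.Str.count food "(" = 1
instance (foods : List String) : Decidable (Pre_process_recipes foods) := by
  unfold Pre_process_recipes; infer_instance

def pvWitness_process_recipes : List String := ["mxmxvkd kfcds (contains dairy, fish)"]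

def Spec_process_recipes (foods : List String)
    (out : List String × (List (String × Int)) × (List (String × List String))) : Prop :=
  out = process_recipes_alt foods
instance (foods : List String) (out : List String × (List (String × Int)) × (List (String × List String))) :
    Decidable (Spec_process_recipes foods out) := by unfold Spec_process_recipes; infer_instance

-- ===== CLAIM (what is proved, stated in full; the proofs are below) =====
def Claim_equal_process_recipes : Prop :=
  ∀ (foods : List String), Dom_process_recipes foods → Pre_process_recipes foods →
    Spec_process_recipes foods (process_recipes foods)

-- ===== LEMMAS AND PROOFS =====

-- raw-token abbreviations used by the proofs
def pvRI (f : String) : List String := pvRawIngs (pvSplitParen f).1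
def pvRA (f : String) : List String := pvRawAllgs (pvSplitParen f).2

theorem pvContains_ofList (xs : List String) (a : String) :
    (PySem.Set.ofList xs).contains a = xs.contains a := by
  rw [Bool.eq_iff_iff]
  simp [PySem.Set.contains_iff, PySem.Set.mem_ofList, List.contains_iff_mem]

theorem pvPyGetNeg1 (xs : List (List String)) : PySem.List.pyGet? xs (-1) = xs.getLast? := by
  cases xs with
  | nil => rfl
  | cons h t => simp [PySem.List.pyGet?, PySem.List.pyIdx?, List.getLast?_eq_getElem?]

theorem pvUpdate_ofList (s : PySem.Set String) (xs : List String) :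
    PySem.Set.update s (PySem.Set.ofList xs) = PySem.Set.update s xs := by
  rw [PySem.Set.update_eq_append_filter, PySem.Set.update_eq_append_filter,
      PySem.Set.ofList_ofList]

theorem pvUpdate_flatMap_ofList {a : Type} (f : a -> List String) (l : List a) :
    ∀ s : PySem.Set String,
      PySem.Set.update s (l.flatMap (fun x => PySem.Set.ofList (f x)))
        = PySem.Set.update s (l.flatMap f) := by
  induction l with
  | nil => intro s; rfl
  | cons x l ih =>
    intro s
    simp only [List.flatMap_cons, PySem.Set.update_append]
    rw [pvUpdate_ofList]
    exact ih _

theorem pvOfList_flatMap_ofList {a : Type} (f : a -> List String) (l : List a) :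
    PySem.Set.ofList (l.flatMap (fun x => PySem.Set.ofList (f x)))
      = PySem.Set.ofList (l.flatMap f) := by
  rw [← PySem.Set.update_nil_left, pvUpdate_flatMap_ofList, PySem.Set.update_nil_left]

theorem pvAll_eq (foods : List String) :
    ∀ s : PySem.Set String,
      foods.foldl (fun acc f => PySem.Set.union acc (pvIngs (pvSplitParen f).1)) s
        = PySem.Set.update s (foods.flatMap pvRI) := by
  induction foods with
  | nil => intro s; simp [PySem.Set.update_nil]
  | cons f foods ih =>
    intro s
    have h1 : PySem.Set.union s (pvIngs (pvSplitParen f).1) = PySem.Set.update s (pvRI f) :=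
      pvUpdate_ofList s (pvRI f)
    rw [List.foldl_cons, h1, ih, List.flatMap_cons, PySem.Set.update_append]

-- the three per-food loop bodies of port A (proof-layer names)
def pvStepA (all : List String) (d : PySem.Dict String (List String)) (food : String) :
    PySem.Dict String (List String) :=
  (pvAllgs (pvSplitParen food).2).foldl
    (fun d a => d.insert a (PySem.Set.inter (pvIngs (pvSplitParen food).1) (d.getD a all))) d

def pvStepC (d : PySem.Dict String Int) (food : String) : PySem.Dict String Int :=
  (pvIngs (pvSplitParen food).1).foldl (fun d i => d.modify i 0 (· + 1)) d

def pvStepG (g : PySem.Dict String (List (List String))) (food : String) :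
    PySem.Dict String (List (List String)) :=
  (pvAllgs (pvSplitParen food).2).foldl
    (fun g a => g.modify a [] (· ++ [pvIngs (pvSplitParen food).1])) g

-- A's interleaved fold is two independent folds
theorem pvSplitPairA (all : List String) (l : List String) :
    List.foldl
      (fun (st : PySem.Dict String (List String) × PySem.Dict String Int) food =>
        (List.foldl
            (fun d a => d.insert a ((pvIngs (pvSplitParen food).1).inter (d.getD a all)))
            st.1 (pvAllgs (pvSplitParen food).2),
          List.foldl (fun d i => d.modify i 0 fun x => x + 1) st.2 (pvIngs (pvSplitParen food).1)))
      (PySem.Dict.empty, PySem.Dict.empty) l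
      = (l.foldl (pvStepA all) PySem.Dict.empty, l.foldl pvStepC PySem.Dict.empty) :=
  PySem.List.foldl_prod_mk (pvStepA all) pvStepC l _ _

-- fold of intersections, as A's interleaved dict updates compute it per key
def pvInterFold (all : List String) (ss : List (List String)) : List String :=
  ss.foldl (fun acc s => PySem.Set.inter s acc) all

theorem pvInterFold_append (all : List String) (ss : List (List String)) (ing : List String) :
    pvInterFold all (ss ++ [ing]) = PySem.Set.inter ing (pvInterFold all ss) := by
  simp [pvInterFold]

theorem pvInterFold_mem (x : String) :
    ∀ (ss : List (List String)) (all : List String),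
      x ∈ pvInterFold all ss ↔ x ∈ all ∧ ∀ s ∈ ss, x ∈ s := by
  intro ss
  induction ss with
  | nil => intro all; simp [pvInterFold]
  | cons s ss ih =>
    intro all
    have h : pvInterFold all (s :: ss) = pvInterFold (PySem.Set.inter s all) ss := rfl
    rw [h, ih]
    have h2 := PySem.Set.mem_inter s all x
    simp only [List.mem_cons]
    constructor
    · rintro ⟨hm, hs⟩
      rcases h2.mp hm with ⟨h3, h4⟩
      exact ⟨h4, fun t ht => ht.elim (fun e => e ▸ h3) (hs t)⟩
    · rintro ⟨ha, hs⟩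
      exact ⟨h2.mpr ⟨hs s (Or.inl rfl), ha⟩, fun t ht => hs t (Or.inr ht)⟩

theorem pvInterFold_getLast (all : List String) :
    ∀ (ss : List (List String)) (h : ss ≠ []),
      pvInterFold all ss
        = (ss.getLast h).filter (fun i => all.contains i && ss.all (fun s => s.contains i)) := by
  intro ss
  induction ss using List.reverseRecOn with
  | nil => intro h; exact absurd rfl h
  | append_singleton T s ih =>
    intro h
    rw [pvInterFold_append]
    have hg : (T ++ [s]).getLast h = s := by simp
    rw [hg]
    show s.filter (fun i => (pvInterFold all T).contains i) = _
    apply List.filter_congr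
    intro i hi
    rw [Bool.eq_iff_iff]
    simp only [List.contains_iff_mem, pvInterFold_mem, Bool.and_eq_true, List.all_append,
      List.all_eq_true, List.all_cons, List.all_nil, Bool.and_true, decide_eq_true_eq]
    constructor
    · rintro ⟨ha, hs⟩
      exact ⟨by simpa [List.contains_iff_mem] using ha,
        ⟨fun t ht => by simpa [List.contains_iff_mem] using hs t ht,
         by simpa [List.contains_iff_mem] using hi⟩⟩
    · rintro ⟨ha, hs, _⟩
      exact ⟨by simpa [List.contains_iff_mem] using ha,
        fun t ht => by simpa [List.contains_iff_mem] using hs t ht⟩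

-- the value-wise image of the grouping dict that A's interleaved dict maintains
def pvMapVals (all : List String) (g : PySem.Dict String (List (List String))) :
    PySem.Dict String (List String) :=
  PySem.Dict.mk (g.items.map (fun p => (p.1, pvInterFold all p.2)))

theorem pvMapVals_contains (all : List String) (g : PySem.Dict String (List (List String))) (a : String) :
    (pvMapVals all g).contains a = g.contains a := by
  cases g with
  | mk ps => simp only [pvMapVals, PySem.Dict.contains_mk, List.any_map]; rfl

theorem pvMapVals_getD (all : List String) (g : PySem.Dict String (List (List String))) (a : String) :
    (pvMapVals all g).getD a all = pvInterFold all (g.getD a []) := by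
  cases g with
  | mk ps =>
    induction ps with
    | nil => rfl
    | cons p ps ih =>
      simp only [pvMapVals, PySem.Dict.getD, PySem.Dict.get?, List.map_cons, List.find?] at *
      by_cases h : p.1 == a
      · simp [h]
      · simp only [h, Bool.false_eq_true] at *
        simpa using ih

theorem pvMapVals_items (all : List String) (g : PySem.Dict String (List (List String))) :
    (pvMapVals all g).items = g.items.map (fun p => (p.1, pvInterFold all p.2)) := rfl

theorem pvMapVals_insert (all : List String) (g : PySem.Dict String (List (List String)))
    (a : String) (w : List (List String)) :
    pvMapVals all (g.insert a w) = (pvMapVals all g).insert a (pvInterFold all w) := by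
  apply PySem.Dict.ext
  by_cases h : g.contains a = true
  · rw [PySem.Dict.items_insert_of_contains _ _ ((pvMapVals_contains all g a).trans h),
        pvMapVals_items, pvMapVals_items, PySem.Dict.items_insert_of_contains _ _ h,
        List.map_map, List.map_map]
    apply List.map_congr_left
    intro p _
    by_cases hp : p.1 = a <;> simp [hp]
  · rw [PySem.Dict.items_insert_of_not_contains _ _
          ((pvMapVals_contains all g a).trans (Bool.not_eq_true _ ▸ eq_false_of_ne_true h)),
        pvMapVals_items, pvMapVals_items,
        PySem.Dict.items_insert_of_not_contains _ _ (eq_false_of_ne_true h)]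
    simp

theorem pvMapVals_modify (all : List String) (g : PySem.Dict String (List (List String)))
    (a : String) (ing : List String) :
    pvMapVals all (g.modify a [] (· ++ [ing]))
      = (pvMapVals all g).insert a (PySem.Set.inter ing ((pvMapVals all g).getD a all)) := by
  rw [PySem.Dict.modify, pvMapVals_insert, pvInterFold_append, pvMapVals_getD]

theorem pvMapVals_foldl (all : List String) (ing : List String) (al : List String)
    (g : PySem.Dict String (List (List String))) :
    pvMapVals all (al.foldl (fun g a => g.modify a [] (· ++ [ing])) g)
      = al.foldl (fun d a => d.insert a (PySem.Set.inter ing (d.getD a all))) (pvMapVals all g) := by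
  induction al generalizing g with
  | nil => rfl
  | cons a al ih => simp only [List.foldl_cons, ih, pvMapVals_modify]

theorem pvDict_eq (all : List String) (foods : List String) :
    ∀ g : PySem.Dict String (List (List String)),
      foods.foldl (pvStepA all) (pvMapVals all g) = pvMapVals all (foods.foldl pvStepG g) := by
  induction foods with
  | nil => intro g; rfl
  | cons food foods ih =>
    intro g
    simp only [List.foldl_cons]
    have h1 : pvStepA all (pvMapVals all g) food = pvMapVals all (pvStepG g food) := by
      unfold pvStepA pvStepG
      exact (pvMapVals_foldl all (pvIngs (pvSplitParen food).1)
        (pvAllgs (pvSplitParen food).2) g).symm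
    rw [h1]
    exact ih _

theorem pvMapVals_empty (all : List String) :
    pvMapVals all PySem.Dict.empty = PySem.Dict.empty := rfl

theorem pvDict_eq' (all l : List String) :
    l.foldl (pvStepA all) PySem.Dict.empty = pvMapVals all (l.foldl pvStepG PySem.Dict.empty) := by
  have h := pvDict_eq all l PySem.Dict.empty
  rwa [pvMapVals_empty] at h

theorem pvGroups_nodup (foods : List String) :
    ∀ g : PySem.Dict String (List (List String)), g.keys.Nodup →
      (foods.foldl pvStepG g).keys.Nodup := by
  induction foods with
  | nil => intro g h; exact h
  | cons food foods ih =>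
    intro g h
    simp only [List.foldl_cons]
    apply ih
    exact PySem.Dict.nodup_keys_foldl_modify_key _ (fun a => a) []
      (fun _ _ ss => ss ++ [pvIngs (pvSplitParen food).1]) g h

theorem pvEmpty_keys_nodup : (PySem.Dict.empty : PySem.Dict String (List (List String))).keys.Nodup := by
  simp [PySem.Dict.empty, PySem.Dict.keys]

theorem pvGroups_keys (foods : List String) :
    ∀ g : PySem.Dict String (List (List String)),
      (foods.foldl pvStepG g).keys
        = PySem.Set.update g.keys (foods.flatMap (fun f => pvAllgs (pvSplitParen f).2)) := by
  induction foods with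
  | nil => intro g; simp [PySem.Set.update_nil]
  | cons f foods ih =>
    intro g
    have h1 : (pvStepG g f).keys = PySem.Set.update g.keys (pvAllgs (pvSplitParen f).2) := by
      unfold pvStepG
      rw [PySem.Dict.keys_foldl_modify]
    rw [List.foldl_cons, ih, h1, List.flatMap_cons, PySem.Set.update_append]

theorem pvInner_getD (v : List String) (c : String) :
    ∀ (al : List String), al.Nodup →
      ∀ g : PySem.Dict String (List (List String)),
        (al.foldl (fun g a => g.modify a [] (· ++ [v])) g).getD c []
          = g.getD c [] ++ (if al.contains c then [v] else []) := by
  intro al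
  induction al with
  | nil => intro _ g; simp
  | cons a al ih =>
    intro hnd g
    have hna : a ∉ al := (List.nodup_cons.mp hnd).1
    rw [List.foldl_cons, ih (List.nodup_cons.mp hnd).2]
    by_cases h : c = a
    · subst h
      have hc1 : al.contains c = false := by
        rw [Bool.eq_false_iff]
        intro hh
        exact hna (List.contains_iff_mem.mp hh)
      have hcc : (c :: al).contains c = true := by
        simp [List.contains_iff_mem]
      rw [PySem.Dict.getD_modify_self, hc1, hcc]
      simp
    · have h2 : (g.modify a [] (· ++ [v])).getD c [] = g.getD c [] := by
        rw [PySem.Dict.getD_modify]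
        simp [h]
      rw [h2]
      have h3 : (a :: al).contains c = al.contains c := by
        rw [Bool.eq_iff_iff]
        simp [List.contains_iff_mem, List.mem_cons, h]
      rw [h3]

theorem pvGroups_getD (c : String) (foods : List String) :
    ∀ g : PySem.Dict String (List (List String)),
      (foods.foldl pvStepG g).getD c []
        = g.getD c []
          ++ (foods.filter (fun f => (pvAllgs (pvSplitParen f).2).contains c)).map
              (fun f => pvIngs (pvSplitParen f).1) := by
  induction foods with
  | nil => intro g; simp
  | cons f foods ih =>
    intro g
    rw [List.foldl_cons, ih]
    show (pvStepG g f).getD c [] ++ _ = _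
    unfold pvStepG
    have hnd : (pvAllgs (pvSplitParen f).2).Nodup := PySem.Set.nodup_ofList _
    rw [pvInner_getD (pvIngs (pvSplitParen f).1) c (pvAllgs (pvSplitParen f).2) hnd g]
    by_cases h : c ∈ pvAllgs (pvSplitParen f).2
    · simp [h, List.filter_cons, List.append_assoc, List.contains_iff_mem]
    · simp [h, List.filter_cons, List.contains_iff_mem]

-- union-fold membership (A's reduce over the dict values)
theorem pvUnionFold_mem (x : String) :
    ∀ (vs : List (List String)) (v : List String),
      x ∈ vs.foldl (fun a b => PySem.Set.union a b) v ↔ x ∈ v ∨ ∃ u ∈ vs, x ∈ u := by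
  intro vs
  induction vs with
  | nil => intro v; simp
  | cons u vs ih =>
    intro v
    rw [List.foldl_cons, ih]
    have h := PySem.Set.mem_union v u x
    constructor
    · rintro (hm | ⟨w, hw, hx⟩)
      · rcases h.mp hm with h1 | h1
        · exact Or.inl h1
        · exact Or.inr ⟨u, List.mem_cons_self, h1⟩
      · exact Or.inr ⟨w, List.mem_cons_of_mem _ hw, hx⟩
    · rintro (h1 | ⟨w, hw, hx⟩)
      · exact Or.inl (h.mpr (Or.inl h1))
      · rcases List.mem_cons.mp hw with rfl | hw'
        · exact Or.inl (h.mpr (Or.inr hx))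
        · exact Or.inr ⟨w, hw', hx⟩

theorem pvCntB (i : String) (foods : List String) :
    ∀ c : Int,
      foods.foldl (fun n f => if (pvRI f).contains i then n + 1 else n) c
        = c + ((foods.flatMap (fun f => pvIngs (pvSplitParen f).1)).count i : Int) := by
  induction foods with
  | nil => intro c; simp
  | cons f foods ih =>
    intro c
    rw [List.flatMap_cons, List.count_append]
    by_cases h : i ∈ pvRI f
    · have hc : (pvRI f).contains i = true := List.contains_iff_mem.mpr h
      have hm : i ∈ pvIngs (pvSplitParen f).1 := by
        show i ∈ PySem.Set.ofList (pvRI f)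
        exact (PySem.Set.mem_ofList _ _).mpr h
      have hnd : (pvIngs (pvSplitParen f).1).Nodup := PySem.Set.nodup_ofList (pvRI f)
      have h1 : (pvIngs (pvSplitParen f).1).count i = 1 :=
        List.count_eq_one_of_mem hnd hm
      rw [List.foldl_cons, if_pos hc, ih, h1]
      push_cast
      ring
    · have hc : (pvRI f).contains i ≠ true := by
        intro hh
        exact h (List.contains_iff_mem.mp hh)
      have hm : i ∉ pvIngs (pvSplitParen f).1 := by
        show i ∉ PySem.Set.ofList (pvRI f)
        intro hm2
        exact h ((PySem.Set.mem_ofList _ _).mp hm2)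
      have h1 : (pvIngs (pvSplitParen f).1).count i = 0 := List.count_eq_zero.mpr hm
      rw [List.foldl_cons, if_neg hc, ih, h1]
      simp

theorem pvCounts_eq (foods : List String) :
    foods.foldl pvStepC PySem.Dict.empty
      = PySem.Dict.counter (foods.flatMap (fun f => pvIngs (pvSplitParen f).1)) := by
  rw [PySem.Dict.counter_eq_foldl, List.foldl_flatMap]
  rfl

theorem pvIngs_eq (f : String) : pvIngs (pvSplitParen f).1 = PySem.Set.ofList (pvRI f) := rfl

theorem pvAllgs_eq (f : String) : pvAllgs (pvSplitParen f).2 = PySem.Set.ofList (pvRA f) := rfl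

theorem pvBrecs (foods : List String) :
    pvB_recs foods = foods.map (fun f => (pvRI f, pvRA f)) := rfl

theorem pvAllA (foods : List String) :
    pvA_all foods = PySem.Set.ofList (foods.flatMap pvRI) := by
  unfold pvA_all
  rw [pvAll_eq foods PySem.Set.empty]
  exact PySem.Set.update_nil_left _

theorem pvBiord (foods : List String) :
    pvB_iord foods = PySem.Set.ofList (foods.flatMap pvRI) := by
  unfold pvB_iord
  rw [pvBrecs, List.flatMap_map, PySem.List.dedup_eq_ofList]

theorem pvBorder (foods : List String) :
    pvB_order foods = PySem.Set.ofList (foods.flatMap pvRA) := by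
  unfold pvB_order
  rw [pvBrecs, List.flatMap_map, PySem.List.dedup_eq_ofList]

def pvGroups (foods : List String) : PySem.Dict String (List (List String)) :=
  foods.foldl pvStepG PySem.Dict.empty

theorem pvGroupsKeys (foods : List String) :
    (pvGroups foods).keys = PySem.Set.ofList (foods.flatMap pvRA) := by
  unfold pvGroups
  rw [pvGroups_keys foods PySem.Dict.empty, PySem.Dict.keys_empty, PySem.Set.update_nil_left]
  have h : (foods.flatMap fun f => pvAllgs (pvSplitParen f).2)
      = foods.flatMap fun f => PySem.Set.ofList (pvRA f) := rfl
  rw [h, pvOfList_flatMap_ofList]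

theorem pvGroupsKeysNodup (foods : List String) : (pvGroups foods).keys.Nodup :=
  pvGroups_nodup foods _ pvEmpty_keys_nodup

theorem pvGroupsGetD (foods : List String) (a : String) :
    (pvGroups foods).getD a []
      = (foods.filter (fun f => (pvAllgs (pvSplitParen f).2).contains a)).map
          (fun f => pvIngs (pvSplitParen f).1) := by
  unfold pvGroups
  rw [pvGroups_getD a foods PySem.Dict.empty, PySem.Dict.getD_empty, List.nil_append]

theorem pvStPair (foods : List String) :
    pvA_st foods
      = (foods.foldl (pvStepA (pvA_all foods)) PySem.Dict.empty,
         foods.foldl pvStepC PySem.Dict.empty) :=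
  pvSplitPairA (pvA_all foods) foods

theorem pvCcdA (foods : List String) :
    (pvA_st foods).1 = pvMapVals (pvA_all foods) (pvGroups foods) := by
  rw [pvStPair]
  exact pvDict_eq' (pvA_all foods) foods

set_option maxHeartbeats 1000000 in
theorem pvBgroup (a : String) (foods : List String) :
    pvB_group foods a
      = (foods.filter (fun f => (pvAllgs (pvSplitParen f).2).contains a)).map pvRI := by
  induction foods with
  | nil => rfl
  | cons f foods ih =>
    have hstep : pvB_group (f :: foods) a
        = if a ∈ pvAllgs (pvSplitParen f).2
          then pvRI f :: pvB_group foods a else pvB_group foods a := by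
      unfold pvB_group
      rw [pvBrecs, pvBrecs, List.map_cons, List.filter_cons]
      by_cases h : a ∈ pvAllgs (pvSplitParen f).2
      · have h2 : a ∈ pvRA f := (PySem.Set.mem_ofList _ _).mp h
        simp [h, h2]
      · have h2 : a ∉ pvRA f := fun hm => h ((PySem.Set.mem_ofList _ _).mpr hm)
        simp [h, h2]
    rw [hstep, List.filter_cons]
    by_cases h : a ∈ pvAllgs (pvSplitParen f).2
    · simp [h, ih, List.contains_iff_mem]
    · simp [h, ih, List.contains_iff_mem]

set_option maxHeartbeats 2000000 in
theorem pvCandEq (foods : List String) (a : String)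
    (ha : a ∈ PySem.Set.ofList (foods.flatMap pvRA)) :
    pvB_cand foods a
      = pvInterFold (PySem.Set.ofList (foods.flatMap pvRI)) ((pvGroups foods).getD a []) := by
  have hGroup := pvBgroup a foods
  have hG : foods.filter (fun f => (pvAllgs (pvSplitParen f).2).contains a) ≠ [] := by
    rcases List.mem_flatMap.mp ((PySem.Set.mem_ofList _ _).mp ha) with ⟨f0, hf0, ha0⟩
    apply List.ne_nil_of_mem (a := f0)
    apply List.mem_filter.mpr
    refine ⟨hf0, ?_⟩
    rw [pvAllgs_eq, pvContains_ofList]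
    exact List.contains_iff_mem.mpr ha0
  have hS : (foods.filter (fun f => (pvAllgs (pvSplitParen f).2).contains a)).map
      (fun f => pvIngs (pvSplitParen f).1) ≠ [] := by
    intro he
    exact hG (List.map_eq_nil_iff.mp he)
  rw [pvGroupsGetD, pvInterFold_getLast _ _ hS]
  have hlastS : (List.map (fun f => pvIngs (pvSplitParen f).1)
        (foods.filter (fun f => (pvAllgs (pvSplitParen f).2).contains a))).getLast hS
      = pvIngs (pvSplitParen ((foods.filter
          (fun f => (pvAllgs (pvSplitParen f).2).contains a)).getLast hG)).1 := by
    have h1 := List.getLast?_eq_getLast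
      (l := List.map (fun f => pvIngs (pvSplitParen f).1)
        (foods.filter (fun f => (pvAllgs (pvSplitParen f).2).contains a))) hS
    rw [List.getLast?_map, List.getLast?_eq_getLast hG] at h1
    exact Option.some.inj h1.symm
  have hbase2 : pvB_base foods a
      = PySem.Set.ofList (pvRI ((foods.filter
          (fun f => (pvAllgs (pvSplitParen f).2).contains a)).getLast hG)) := by
    unfold pvB_base
    rw [hGroup, pvPyGetNeg1, List.getLast?_map, List.getLast?_eq_getLast hG]
    simp only [Option.map_some, Option.getD_some, PySem.List.dedup_eq_ofList]
  unfold pvB_cand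
  rw [hbase2, hGroup, hlastS]
  have hbase : pvIngs (pvSplitParen ((foods.filter
      (fun f => (pvAllgs (pvSplitParen f).2).contains a)).getLast hG)).1
      = PySem.Set.ofList (pvRI ((foods.filter
          (fun f => (pvAllgs (pvSplitParen f).2).contains a)).getLast hG)) := rfl
  rw [hbase]
  apply List.filter_congr
  intro i hi
  have hiR : i ∈ pvRI ((foods.filter
      (fun f => (pvAllgs (pvSplitParen f).2).contains a)).getLast hG) :=
    (PySem.Set.mem_ofList _ _).mp hi
  have hAllc : List.contains (PySem.Set.ofList (foods.flatMap pvRI)) i = true :=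
    List.contains_iff_mem.mpr ((PySem.Set.mem_ofList _ _).mpr (List.mem_flatMap.mpr
      ⟨_, List.mem_of_mem_filter (List.getLast_mem hG), hiR⟩))
  rw [hAllc, Bool.true_and, List.all_map, List.all_map]
  have hCC : ((fun s : List String => s.contains i) ∘ fun f => pvIngs (pvSplitParen f).1)
      = ((fun g : List String => g.contains i) ∘ pvRI) := by
    funext f
    simp only [Function.comp_apply]
    rw [Bool.eq_iff_iff]
    simp only [List.contains_iff_mem, pvIngs_eq, PySem.Set.mem_ofList]
  rw [hCC]

theorem pvBccdKeysNodup (foods : List String) : (pvB_ccd foods).keys.Nodup := by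
  unfold pvB_ccd
  exact PySem.Dict.nodup_keys_foldl_insert _ _ _ PySem.Dict.nodup_keys_empty

theorem pvBccdKeys (foods : List String) : (pvB_ccd foods).keys = pvB_order foods := by
  unfold pvB_ccd
  rw [PySem.Dict.keys_foldl_insert, PySem.Dict.keys_empty, PySem.Set.update_nil_left,
      pvBorder, PySem.Set.ofList_ofList, ← pvBorder]

theorem pvBccdItems (foods : List String) :
    (pvB_ccd foods).items = (pvB_order foods).map (fun a => (a, pvB_cand foods a)) := by
  unfold pvB_ccd
  have hfresh : ∀ a ∈ pvB_order foods,
      (PySem.Dict.empty : PySem.Dict String (List String)).contains a = false :=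
    fun a _ => PySem.Dict.contains_empty a
  have hnd : (List.map (fun a : String => a) (pvB_order foods)).Nodup := by
    have h1 : List.map (fun a : String => a) (pvB_order foods) = pvB_order foods :=
      List.map_id' _
    rw [h1, pvBorder]
    exact PySem.Set.nodup_ofList _
  rw [PySem.Dict.items_foldl_insert_fresh (pvB_order foods) (fun a => a)
        (fun a => pvB_cand foods a) PySem.Dict.empty hfresh hnd]
  have he : (PySem.Dict.empty : PySem.Dict String (List String)).items = [] := rfl
  rw [he, List.nil_append]

theorem pvCcdItemsEq (foods : List String) :
    (pvA_st foods).1.items = (pvB_ccd foods).items := by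
  rw [pvCcdA, pvMapVals_items,
      PySem.Dict.items_eq_map_keys _ (pvGroupsKeysNodup foods) ([] : List (List String)),
      List.map_map, pvBccdItems, pvGroupsKeys, pvBorder]
  apply List.map_congr_left
  intro a ha
  show (a, pvInterFold (pvA_all foods) ((pvGroups foods).getD a [])) = (a, pvB_cand foods a)
  rw [pvAllA, pvCandEq foods a ha]

theorem pvCountsItemsEq (foods : List String) :
    (pvA_st foods).2.items = (pvB_counts foods).items := by
  have h2 : (pvA_st foods).2 = foods.foldl pvStepC PySem.Dict.empty := by rw [pvStPair]
  rw [h2, pvCounts_eq, PySem.Dict.items_counter]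
  unfold pvB_counts
  have hfresh : ∀ i ∈ pvB_iord foods,
      (PySem.Dict.empty : PySem.Dict String Int).contains i = false :=
    fun i _ => PySem.Dict.contains_empty i
  have hnd : (List.map (fun i : String => i) (pvB_iord foods)).Nodup := by
    have h1 : List.map (fun i : String => i) (pvB_iord foods) = pvB_iord foods :=
      List.map_id' _
    rw [h1, pvBiord]
    exact PySem.Set.nodup_ofList _
  rw [PySem.Dict.items_foldl_insert_fresh (pvB_iord foods) (fun i => i)
        (fun i => pvB_cnt foods i) PySem.Dict.empty hfresh hnd]
  have he : (PySem.Dict.empty : PySem.Dict String Int).items = [] := rfl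
  rw [he, List.nil_append, pvBiord]
  have hLS : PySem.Set.ofList (foods.flatMap (fun f => pvIngs (pvSplitParen f).1))
      = PySem.Set.ofList (foods.flatMap pvRI) := by
    have h3 : (foods.flatMap fun f => pvIngs (pvSplitParen f).1)
        = foods.flatMap fun f => PySem.Set.ofList (pvRI f) := rfl
    rw [h3, pvOfList_flatMap_ofList]
  rw [hLS]
  apply List.map_congr_left
  intro i _
  have hcnt : pvB_cnt foods i
      = ((foods.flatMap (fun f => pvIngs (pvSplitParen f).1)).count i : Int) := by
    unfold pvB_cnt
    rw [pvBrecs, List.foldl_map]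
    simpa using pvCntB i foods 0
  rw [hcnt]

theorem pvUnseenEq (foods : List String)
    (hccd : (pvA_st foods).1 = pvB_ccd foods) : pvA_unseen foods = pvB_unseen foods := by
  unfold pvA_unseen pvB_unseen
  rw [pvAllA, pvBiord]
  show (PySem.Set.ofList (foods.flatMap pvRI)).filter _ = _
  apply List.filter_congr
  intro i _
  have hvals : (pvB_ccd foods).values
      = (pvB_order foods).map (fun a => (pvB_ccd foods).getD a (pvB_all foods)) := by
    rw [← pvBccdKeys]
    exact PySem.Dict.values_eq_map_keys _ (pvBccdKeysNodup foods) _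
  have hbig : PySem.Set.contains (pvA_big foods) i
      = (pvB_order foods).any (fun a => ((pvB_ccd foods).getD a (pvB_all foods)).contains i) := by
    rw [PySem.Set.contains_eq_listContains]
    unfold pvA_big
    rw [hccd, hvals]
    cases hord : pvB_order foods with
    | nil => rfl
    | cons a as =>
      simp only [List.map_cons]
      rw [Bool.eq_iff_iff]
      simp only [List.contains_iff_mem, pvUnionFold_mem, List.any_eq_true, List.mem_map,
        List.mem_cons]
      aesop
  rw [hbig]

-- ===== VERDICT (by name: the statement is the Claim_ definition above) =====
theorem pvMain (foods : List String) : process_recipes foods = process_recipes_alt foods := by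
  unfold process_recipes process_recipes_alt
  have hd : (pvA_st foods).1 = pvB_ccd foods := PySem.Dict.ext (pvCcdItemsEq foods)
  rw [pvUnseenEq foods hd, pvCountsItemsEq foods, hd]

theorem process_recipes_spec : Claim_equal_process_recipes := by
  intro foods _ _
  exact pvMain foods
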